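-- pv_equiv track=rewrite | github.com/xiaotang-12-ops/yilite | 参考项目/processing/ingest.py | _find_last_int
-- ===== SOURCE A (Python) =====
-- from typing import Any, Dict, Iterable, List, Optional, Tuple
--
-- def _find_last_int(tokens: List[str]) -> Optional[Tuple[int, int]]:
--     for idx in range(len(tokens) - 1, -1, -1):
--         token = tokens[idx]
--         if token.isdigit():
--             try:
--                 return int(token), idx
--             except ValueError:
--                 continue
--     return None
-- ===== SOURCE B (Python) =====
-- def _find_last_int(tokens):
--     result = None
--     for idx, token in enumerate(tokens):
--         if token.isdigit():
--             try:
--                 result = (int(token), idx)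
--             except ValueError:
--                 continue
--     return result
-- ===== Notes on version B (the rewrite author's own statement) =====
-- stated objective: alternative
-- what changed: Backward index scan with early return replaced by a single forward enumerate pass keeping an accumulator that the last convertible all-digit token overwrites.
import Mathlib
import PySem

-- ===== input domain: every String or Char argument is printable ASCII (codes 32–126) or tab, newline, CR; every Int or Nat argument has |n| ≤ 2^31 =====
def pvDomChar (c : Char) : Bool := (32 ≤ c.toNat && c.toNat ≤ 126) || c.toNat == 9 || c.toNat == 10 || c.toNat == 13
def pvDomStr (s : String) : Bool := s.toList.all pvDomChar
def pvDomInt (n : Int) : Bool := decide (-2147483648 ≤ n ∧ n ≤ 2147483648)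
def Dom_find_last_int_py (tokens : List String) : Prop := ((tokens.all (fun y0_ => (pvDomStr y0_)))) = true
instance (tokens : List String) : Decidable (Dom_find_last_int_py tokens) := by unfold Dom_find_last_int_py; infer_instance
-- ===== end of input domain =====

-- B replaces A's backward index scan with early return by one forward enumerate pass
-- keeping an accumulator that the last convertible all-digit token overwrites (alternative decomposition, same cost).

-- ===== PORT A =====
-- countdown loop: `for idx in range(len(tokens) - 1, -1, -1)`; the argument n+1 means current idx = n
def findLastIntLoop (tokens : List String) : Nat → Option (Int × Int)
  | 0 => none
  | n+1 =>
    match PySem.List.pyGet? tokens (n : Int) with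
    | none => none          -- unreachable: idx is always in range
    | some token =>
      if PySem.Str.strIsdigit token then
        match PySem.Int.ofStr? token with
        | some v => some (v, (n : Int))
        | none => findLastIntLoop tokens n   -- except ValueError: continue
      else findLastIntLoop tokens n

def find_last_int_py (tokens : List String) : Option (Int × Int) :=
  findLastIntLoop tokens tokens.length

-- ===== PORT B =====
def find_last_int_py_alt (tokens : List String) : Option (Int × Int) :=
  (PySem.List.enumerate tokens 0).foldl
    (fun result p =>
      if PySem.Str.strIsdigit p.2 then
        match PySem.Int.ofStr? p.2 with
        | some v => some (v, p.1)
        | none => result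
      else result) none

-- ===== PRECONDITION & SPEC =====
def Spec_find_last_int_py (tokens : List String) (out : Option (Int × Int)) : Prop := out = find_last_int_py_alt tokens
instance (tokens : List String) (out : Option (Int × Int)) : Decidable (Spec_find_last_int_py tokens out) := by unfold Spec_find_last_int_py; infer_instance

-- ===== CLAIM (what is proved, stated in full; the proofs are below) =====
def Claim_equal_find_last_int_py : Prop := ∀ (tokens : List String), Dom_find_last_int_py tokens → Spec_find_last_int_py tokens (find_last_int_py tokens)

-- ===== LEMMAS AND PROOFS =====

/-- the common per-token result: `some (int(token), idx)` when it matches, else `none` -/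
def pvGood (p : Int × String) : Option (Int × Int) :=
  if PySem.Str.strIsdigit p.2 then (PySem.Int.ofStr? p.2).map (fun v => (v, p.1)) else none

lemma foldlB_eq (l : List (Int × String)) (acc : Option (Int × Int)) :
    l.foldl
      (fun result p =>
        if PySem.Str.strIsdigit p.2 then
          match PySem.Int.ofStr? p.2 with
          | some v => some (v, p.1)
          | none => result
        else result) acc
    = (l.reverse.findSome? pvGood).elim acc some := by
  induction l generalizing acc with
  | nil => simp
  | cons p l ih =>
    simp only [List.foldl_cons, ih, List.reverse_cons, List.findSome?_append]
    rcases h : l.reverse.findSome? pvGood with _ | r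
    · simp only [List.findSome?_cons, pvGood]
      by_cases hd : PySem.Chars.strIsdigit p.2.toList <;>
        rcases ho : PySem.Int.ofStr? p.2 with _ | v <;>
          simp [PySem.Str.strIsdigit, hd, ho]
    · simp

lemma loopA_eq (tokens : List String) :
    ∀ n, n ≤ tokens.length →
      findLastIntLoop tokens n
        = ((PySem.List.enumerate tokens 0).take n).reverse.findSome? pvGood := by
  intro n
  induction n with
  | zero => intro _; simp [findLastIntLoop]
  | succ n ih =>
    intro hle
    have hn : n < tokens.length := by omega
    have hget : PySem.List.pyGet? tokens (n : Int) = some tokens[n] := by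
      simp [PySem.List.pyGet?_natCast, List.getElem?_eq_getElem hn]
    have htake : ((PySem.List.enumerate tokens 0).take (n+1))
        = ((PySem.List.enumerate tokens 0).take n) ++ [((n : Int), tokens[n])] := by
      rw [List.take_add_one]
      have : (PySem.List.enumerate tokens 0)[n]? = some ((n : Int), tokens[n]) := by
        rw [List.getElem?_eq_getElem (by simpa [PySem.List.length_enumerate] using hn)]
        simp [PySem.List.getElem_enumerate]
      simp [this]
    rw [findLastIntLoop, hget, htake, List.reverse_append, ih (by omega)]
    simp only [List.reverse_cons, List.reverse_nil, List.nil_append, List.singleton_append,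
      List.findSome?_cons]
    by_cases hd : PySem.Chars.strIsdigit tokens[n].toList <;>
      rcases ho : PySem.Int.ofStr? tokens[n] with _ | v <;>
        simp [PySem.Str.strIsdigit, hd, ho, pvGood]

-- ===== VERDICT (by name: the statement is the Claim_ definition above) =====
theorem find_last_int_py_spec : Claim_equal_find_last_int_py := by
  intro tokens _
  unfold Spec_find_last_int_py find_last_int_py find_last_int_py_alt
  rw [loopA_eq tokens tokens.length (le_refl _), foldlB_eq]
  rw [List.take_of_length_le (by simp [PySem.List.length_enumerate])]
  rcases h : (PySem.List.enumerate tokens 0).reverse.findSome? pvGood with _ | r <;> simp
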